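-- pv_equiv track=rewrite | github.com/DevWizard-Vandan/ritam | src/reasoning/analog_finder.py | _to_daily_closes
-- ===== SOURCE A (Python) =====
-- def _to_daily_closes(candles: list[dict]) -> list[dict]:
--     """Return one entry per date, keeping the last close of each day."""
--     seen = {}
--     for candle in candles:
--         timestamp_value = str(candle.get("timestamp_ist", ""))
--         if len(timestamp_value) < 10:
--             continue
--         date_value = timestamp_value[:10]
--         seen[date_value] = candle
--     return [seen[day] for day in sorted(seen)]
-- ===== SOURCE B (Python) =====
-- def _to_daily_closes(candles: list[dict]) -> list[dict]:
--     """Return one entry per date, keeping the last close of each day."""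
--     keyed = [(str(c.get("timestamp_ist", ""))[:10], c)
--              for c in candles
--              if len(str(c.get("timestamp_ist", ""))) >= 10]
--
--     def rec(pairs):
--         # selection recursion: emit the earliest day's last candle, recurse on the rest
--         if not pairs:
--             return []
--         day = min(d for d, _ in pairs)
--         group = [c for d, c in pairs if d == day]
--         rest = [(d, c) for d, c in pairs if d != day]
--         return [group[-1]] + rec(rest)
--
--     return rec(keyed)
-- ===== Notes on version B (the rewrite author's own statement) =====
-- stated objective: alternative
-- what changed: Replaces the dict-with-overwrite plus key-sort by a selection recursion over the filtered (date, candle) pairs: repeatedly pick the minimum remaining date, emit the last candle of that day, and recurse on the pairs of the other days; no dict and no sort call.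
import Mathlib
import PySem

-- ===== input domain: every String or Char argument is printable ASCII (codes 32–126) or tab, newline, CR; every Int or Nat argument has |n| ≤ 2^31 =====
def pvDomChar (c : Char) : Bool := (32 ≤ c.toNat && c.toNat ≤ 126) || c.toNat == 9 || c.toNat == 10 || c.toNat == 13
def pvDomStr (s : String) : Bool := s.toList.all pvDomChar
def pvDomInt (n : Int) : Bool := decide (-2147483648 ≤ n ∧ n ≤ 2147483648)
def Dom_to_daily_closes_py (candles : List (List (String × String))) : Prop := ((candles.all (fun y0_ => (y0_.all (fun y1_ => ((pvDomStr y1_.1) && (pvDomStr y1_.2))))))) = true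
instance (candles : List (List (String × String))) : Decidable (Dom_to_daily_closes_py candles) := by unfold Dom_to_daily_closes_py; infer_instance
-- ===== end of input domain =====

-- B replaces A's dict-with-overwrite plus key-sort by a selection recursion over the filtered
-- (date, candle) pairs: emit the minimum remaining day's last candle, recurse on the other days.


-- ===== PORT A =====
-- 'seen[day]' in the comprehension can never raise (day ranges over seen's keys), so it is
-- ported as getD with an unreachable default.
def to_daily_closes_py (candles : List (List (String × String))) : List (List (String × String)) :=
  let seen := candles.foldl
    (fun (seen : PySem.Dict String (List (String × String))) candle =>
      let timestamp_value := (PySem.Dict.mk candle).getD "timestamp_ist" ""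
      if PySem.Str.len timestamp_value < 10 then seen
      else seen.insert (PySem.Str.slice timestamp_value none (some 10)) candle)
    PySem.Dict.empty
  (PySem.List.sorted seen.keys (fun x => x) false).map (fun day => seen.getD day [])

-- ===== PORT B =====
-- Source B's list comprehension building the filtered (date, candle) pairs
def pvKeyed (candles : List (List (String × String))) : List (String × List (String × String)) :=
  (candles.filter
      (fun c => 10 ≤ PySem.Str.len ((PySem.Dict.mk c).getD "timestamp_ist" ""))).map
    (fun c => (PySem.Str.slice ((PySem.Dict.mk c).getD "timestamp_ist" "") none (some 10), c))

-- Source B's inner 'rec'. Python's 'if not pairs: return []' guard is the none branch of min?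
-- (PySem.List.min?_eq_none_iff: none exactly on the empty list); 'group[-1]' is ported as
-- pyGet? (-1) with an unreachable default (the group of the minimum day is nonempty).
def pvRec (pairs : List (String × List (String × String))) : List (List (String × String)) :=
  match hm : PySem.List.min? (pairs.map Prod.fst) (fun d => d) with
  | none => []
  | some day =>
    let group := (pairs.filter (fun p => p.1 == day)).map Prod.snd
    let rest := pairs.filter (fun p => !(p.1 == day))
    [(PySem.List.pyGet? group (-1)).getD []] ++ pvRec rest
termination_by pairs.length
decreasing_by
  obtain ⟨p, hp, hpd⟩ := List.mem_map.mp (PySem.List.min?_mem hm)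
  simp only [List.length_unattach]
  have := List.length_filter_lt_length_iff_exists.mpr
    (⟨⟨p, hp⟩, List.mem_attach _ _, by simp [hpd]⟩ :
      ∃ x ∈ pairs.attach, ¬ ((fun x : {x // x ∈ pairs} => !(x.1.1 == day)) x = true))
  simpa using this

def to_daily_closes_py_alt (candles : List (List (String × String))) : List (List (String × String)) :=
  pvRec (pvKeyed candles)

-- ===== PRECONDITION & SPEC =====
def Spec_to_daily_closes_py (candles : List (List (String × String))) (out : List (List (String × String))) : Prop := out = to_daily_closes_py_alt candles
instance (candles : List (List (String × String))) (out : List (List (String × String))) : Decidable (Spec_to_daily_closes_py candles out) := by unfold Spec_to_daily_closes_py; infer_instance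

-- ===== CLAIM (what is proved, stated in full; the proofs are below) =====
def Claim_equal_to_daily_closes_py : Prop := ∀ (candles : List (List (String × String))), Dom_to_daily_closes_py candles → Spec_to_daily_closes_py candles (to_daily_closes_py candles)

-- ===== LEMMAS AND PROOFS =====

-- first match in the reversed list = last match
theorem pv_find_rev {α : Type} (l : List α) (p : α → Bool) :
    l.reverse.find? p = (l.filter p).getLast? := by
  rw [← List.head?_filter, List.filter_reverse, List.head?_reverse]

-- a filter by a weaker predicate does not change the first match
theorem pv_find_filter {α : Type} (l : List α) (p q : α → Bool)
    (h : ∀ x, p x = true → q x = true) : (l.filter q).find? p = l.find? p := by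
  induction l with
  | nil => rfl
  | cons a t ih =>
    by_cases hp : p a = true
    · simp [h a hp, hp]
    · by_cases hq : q a = true <;> simp [hq, hp, ih]

-- xs[-1] is the last element
theorem pv_pyGet_neg_one {α : Type} (l : List α) :
    PySem.List.pyGet? l (-1) = l.getLast? := by
  cases l with
  | nil => rfl
  | cons a t => simp [PySem.List.pyGet?, PySem.List.pyIdx?, List.getLast?_eq_getElem?]

-- the last-overwrite value of a dict built by repeated insert is the first match in the
-- reversed pair list
theorem pv_foldl_insert_get? {κ ν : Type} [BEq κ] [LawfulBEq κ] [DecidableEq κ]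
    (ps : List (κ × ν)) (d : PySem.Dict κ ν) (k : κ) :
    (ps.foldl (fun d p => d.insert p.1 p.2) d).get? k
      = ((ps.reverse.find? (fun p => p.1 == k)).map Prod.snd).or (d.get? k) := by
  induction ps generalizing d with
  | nil => simp
  | cons p t ih =>
    simp only [List.foldl_cons, List.reverse_cons, List.find?_append, ih,
      PySem.Dict.get?_insert]
    cases h : t.reverse.find? (fun p => p.1 == k) with
    | some q => simp
    | none =>
      simp only [Option.none_or, List.find?]
      by_cases hk : k = p.1
      · simp [hk]
      · have : (p.1 == k) = false := by simp [Ne.symm hk]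
        simp [hk, this]

-- the key list of a dict built by repeated insert is the set-style dedup of the inserted keys
theorem pv_foldl_insert_keys {κ ν : Type} [BEq κ] [LawfulBEq κ] [DecidableEq κ]
    (ps : List (κ × ν)) (d : PySem.Dict κ ν) :
    (ps.foldl (fun d p => d.insert p.1 p.2) d).keys
      = (ps.map Prod.fst).foldl PySem.Set.add d.keys := by
  induction ps generalizing d with
  | nil => rfl
  | cons p t ih =>
    simp only [List.foldl_cons, List.map_cons, ih]
    congr 1
    by_cases h : d.contains p.1 = true
    · rw [PySem.Dict.keys_insert_of_contains _ _ h]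
      rw [PySem.Dict.contains_eq_decide_mem_keys] at h
      simp only [PySem.Set.add, PySem.Set.contains]
      simp [decide_eq_true_eq.mp h]
    · rw [PySem.Dict.keys_insert_of_not_contains _ _ (by simpa using h)]
      rw [PySem.Dict.contains_eq_decide_mem_keys] at h
      simp only [PySem.Set.add, PySem.Set.contains]
      simp [(by simpa using h : ¬ p.1 ∈ d.keys)]

-- A's accumulating loop is the insert-fold over B's keyed pair list
theorem pv_a_fold_eq (candles : List (List (String × String))) :
    candles.foldl
      (fun (seen : PySem.Dict String (List (String × String))) candle =>
        let timestamp_value := (PySem.Dict.mk candle).getD "timestamp_ist" ""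
        if PySem.Str.len timestamp_value < 10 then seen
        else seen.insert (PySem.Str.slice timestamp_value none (some 10)) candle)
      PySem.Dict.empty
      = (pvKeyed candles).foldl (fun d p => d.insert p.1 p.2) PySem.Dict.empty := by
  unfold pvKeyed
  rw [List.foldl_map]
  rw [← PySem.List.foldl_if_eq_foldl_filter
    (f := fun (d : PySem.Dict String (List (String × String))) c =>
      d.insert (PySem.Str.slice ((PySem.Dict.mk c).getD "timestamp_ist" "") none (some 10)) c)]
  apply PySem.List.foldl_congr_mem
  intro acc x _
  dsimp only
  split_ifs with h1 h2 <;>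
    first
      | rfl
      | (exfalso
         simp only [decide_eq_true_eq] at *
         omega)

-- B's selection recursion produces, for each distinct day in sorted order, the last pair
-- carrying that day
-- B's selection recursion produces, for each distinct day in sorted order, the last pair
-- carrying that day (stated with a length bound for the induction)
theorem pv_rec_eq_aux (n : Nat) : ∀ pairs : List (String × List (String × String)),
    pairs.length ≤ n →
    pvRec pairs
      = (PySem.List.sorted (PySem.Set.ofList (pairs.map Prod.fst)) (fun x => x) false).map
          (fun day => (((pairs.reverse.find? (fun p => p.1 == day)).map Prod.snd).getD [])) := by
  induction n with
  | zero =>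
    intro pairs h
    have hnil : pairs = [] := List.eq_nil_of_length_eq_zero (Nat.le_zero.mp h)
    subst hnil
    rw [pvRec.eq_def]
    rfl
  | succ n ih =>
    intro pairs hlen
    rw [pvRec.eq_def]
    split
    case h_1 hm =>
      have hnil : pairs = [] := by
        have := (PySem.List.min?_eq_none_iff (pairs.map Prod.fst) (fun d => d)).mp hm
        simpa using this
      subst hnil
      rfl
    case h_2 day hm =>
      have hmem : day ∈ pairs.map Prod.fst := PySem.List.min?_mem hm
      have hmin : ∀ k ∈ pairs.map Prod.fst, day ≤ k := PySem.List.min?_isMin hm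
      set rest := pairs.filter (fun p => !(p.1 == day)) with hrest
      have hrestK : ∀ a, a ∈ rest.map Prod.fst ↔ (a ∈ pairs.map Prod.fst ∧ a ≠ day) := by
        intro a
        simp only [hrest, List.mem_map, List.mem_filter, Bool.not_eq_eq_eq_not, Bool.not_true,
          beq_eq_false_iff_ne]
        constructor
        · rintro ⟨p, ⟨hp, hne⟩, rfl⟩
          exact ⟨⟨p, hp, rfl⟩, hne⟩
        · rintro ⟨⟨p, hp, rfl⟩, hne⟩
          exact ⟨p, ⟨hp, hne⟩, rfl⟩
      have hlt : rest.length < pairs.length := by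
        obtain ⟨p, hp, hpd⟩ := List.mem_map.mp hmem
        exact List.length_filter_lt_length_iff_exists.mpr ⟨p, hp, by simp [hpd]⟩
      have hih := ih rest (by omega)
      have hsort : PySem.List.sorted (PySem.Set.ofList (pairs.map Prod.fst)) (fun x => x) false
          = day :: PySem.List.sorted (PySem.Set.ofList (rest.map Prod.fst)) (fun x => x) false := by
        apply PySem.List.sorted_eq_of_perm_of_pairwise_lt
        · have hnodupT : (PySem.List.sorted (PySem.Set.ofList (rest.map Prod.fst)) (fun x => x) false).Nodup :=
            (PySem.List.sorted_perm (PySem.Set.ofList (rest.map Prod.fst)) (fun x => x) false).symm.nodup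
              (PySem.Set.nodup_ofList _)
          have hmemT : ∀ a, a ∈ PySem.List.sorted (PySem.Set.ofList (rest.map Prod.fst)) (fun x => x) false
              ↔ (a ∈ pairs.map Prod.fst ∧ a ≠ day) := by
            intro a
            rw [(PySem.List.sorted_perm _ _ _).mem_iff, PySem.Set.mem_ofList, hrestK]
          rw [List.perm_ext_iff_of_nodup _ (PySem.Set.nodup_ofList _)]
          · intro a
            rw [PySem.Set.mem_ofList]
            simp only [List.mem_cons, hmemT]
            constructor
            · rintro (rfl | ⟨h, _⟩)
              · exact hmem
              · exact h
            · intro h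
              by_cases ha : a = day
              · exact Or.inl ha
              · exact Or.inr ⟨h, ha⟩
          · exact List.nodup_cons.mpr ⟨fun h => ((hmemT day).mp h).2 rfl, hnodupT⟩
        · refine List.pairwise_cons.mpr ⟨?_, PySem.List.sorted_ofList_pairwise_lt _⟩
          intro b hb
          have hb' := (PySem.List.sorted_perm _ _ _).mem_iff.mp hb
          rw [PySem.Set.mem_ofList, hrestK] at hb'
          exact lt_of_le_of_ne (hmin b hb'.1) (Ne.symm hb'.2)
      dsimp only
      rw [hih, hsort, List.map_cons, List.singleton_append]
      congr 1
      · -- head: the minimum day's last candle is the last match in the reversed list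
        rw [pv_pyGet_neg_one, List.getLast?_map, ← pv_find_rev]
      · -- tail: finding a day ≠ the minimum day ignores the removed pairs
        apply List.map_congr_left
        intro d hd
        have hd' := (PySem.List.sorted_perm _ _ _).mem_iff.mp hd
        rw [PySem.Set.mem_ofList, hrestK] at hd'
        have hfind : rest.reverse.find? (fun p => p.1 == d) = pairs.reverse.find? (fun p => p.1 == d) := by
          rw [hrest, ← List.filter_reverse]
          apply pv_find_filter
          intro x hx
          have hx1 : x.1 = d := by simpa using hx
          simp [hx1, hd'.2]
        rw [hfind]

theorem pv_rec_eq (pairs : List (String × List (String × String))) :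
    pvRec pairs
      = (PySem.List.sorted (PySem.Set.ofList (pairs.map Prod.fst)) (fun x => x) false).map
          (fun day => (((pairs.reverse.find? (fun p => p.1 == day)).map Prod.snd).getD [])) :=
  pv_rec_eq_aux pairs.length pairs (Nat.le_refl _)

-- ===== VERDICT (by name: the statement is the Claim_ definition above) =====
theorem to_daily_closes_py_spec : Claim_equal_to_daily_closes_py := by
  unfold Claim_equal_to_daily_closes_py
  intro candles _
  unfold Spec_to_daily_closes_py to_daily_closes_py to_daily_closes_py_alt
  simp only []
  rw [pv_a_fold_eq, pv_rec_eq]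
  rw [pv_foldl_insert_keys, PySem.Dict.keys_empty, ← PySem.Set.ofList_eq_foldl]
  apply List.map_congr_left
  intro day _
  rw [PySem.Dict.getD_eq_get?_getD, pv_foldl_insert_get?, PySem.Dict.get?_empty,
    Option.or_none]
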